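-- pv_equiv track=rewrite | github.com/danjane/GymInf | createSeatingPlan.py | latexDeskPositionsSixByFourStandard
-- ===== SOURCE A (Python) =====
-- def latexDeskPositionsSixByFourStandard(num_students):
--     num_rows = (num_students - 1) // 6 + 1
--     xs = [0, 2, 5, 7, 10, 12] * num_rows
--     ys = []
--     for row in range(num_rows):
--         ys += [row*4]*6
--     xs = xs[:num_students]
--     ys = ys[:num_students]
--     return xs, ys
-- ===== SOURCE B (Python) =====
-- def latexDeskPositionsSixByFourStandard(num_students):
--     pattern = (0, 2, 5, 7, 10, 12)
--     xs = [pattern[i % 6] for i in range(num_students)]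
--     ys = [(i // 6) * 4 for i in range(num_students)]
--     return xs, ys
-- ===== Notes on version B (the rewrite author's own statement) =====
-- stated objective: simpler
-- what changed: B drops the row-block construction (list repetition, a row loop of 6-element blocks, and truncating slices) and computes each student's coordinates directly from the student index via i % 6 into a fixed pattern and (i // 6) * 4, building exactly num_students entries.
import Mathlib
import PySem

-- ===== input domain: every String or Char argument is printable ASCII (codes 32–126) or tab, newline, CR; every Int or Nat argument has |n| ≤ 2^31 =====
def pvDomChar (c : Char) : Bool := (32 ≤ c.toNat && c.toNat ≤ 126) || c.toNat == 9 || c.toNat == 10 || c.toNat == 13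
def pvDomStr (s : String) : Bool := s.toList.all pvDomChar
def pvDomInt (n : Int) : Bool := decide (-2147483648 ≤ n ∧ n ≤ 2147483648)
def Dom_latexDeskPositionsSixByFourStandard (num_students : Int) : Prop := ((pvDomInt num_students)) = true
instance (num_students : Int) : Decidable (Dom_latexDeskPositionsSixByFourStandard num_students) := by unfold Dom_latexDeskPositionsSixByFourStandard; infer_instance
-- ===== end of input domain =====

-- B replaces the row-block construction + truncating slices with a direct per-student
-- index formula (pattern[i % 6], (i // 6) * 4); objective: simpler.

-- ===== PORT A =====
def latexDeskPositionsSixByFourStandard (num_students : Int) : List Int × List Int :=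
  let num_rows : Int := PySem.Int.floordiv (num_students - 1) 6 + 1
  -- [0,2,5,7,10,12] * num_rows  (Python list repetition; ≤ 0 copies gives [])
  let xs : List Int := (List.replicate num_rows.toNat ([0, 2, 5, 7, 10, 12] : List Int)).flatten
  let ys : List Int :=
    (PySem.List.pyRange 0 num_rows 1).foldl (fun ys row => ys ++ List.replicate 6 (row * 4)) []
  let xs := PySem.List.slice xs none (some num_students)
  let ys := PySem.List.slice ys none (some num_students)
  (xs, ys)

-- ===== PORT B =====
def latexDeskPositionsSixByFourStandard_alt (num_students : Int) : List Int × List Int :=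
  let pattern : List Int := [0, 2, 5, 7, 10, 12]
  -- pattern[i % 6]: the index is always in [0, 6), so the default never fires
  let xs := (PySem.List.pyRange 0 num_students 1).map
    (fun i => PySem.List.pyGetD pattern (PySem.Int.mod i 6) 0)
  let ys := (PySem.List.pyRange 0 num_students 1).map
    (fun i => PySem.Int.floordiv i 6 * 4)
  (xs, ys)

-- ===== PRECONDITION & SPEC =====
def Spec_latexDeskPositionsSixByFourStandard (num_students : Int) (out : List Int × List Int) : Prop := out = latexDeskPositionsSixByFourStandard_alt num_students
instance (num_students : Int) (out : List Int × List Int) : Decidable (Spec_latexDeskPositionsSixByFourStandard num_students out) := by unfold Spec_latexDeskPositionsSixByFourStandard; infer_instance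

-- ===== CLAIM (what is proved, stated in full; the proofs are below) =====
def Claim_equal_latexDeskPositionsSixByFourStandard : Prop := ∀ (num_students : Int), Dom_latexDeskPositionsSixByFourStandard num_students → Spec_latexDeskPositionsSixByFourStandard num_students (latexDeskPositionsSixByFourStandard num_students)

-- ===== LEMMAS AND PROOFS =====

-- the periodic pattern block of A, characterised pointwise over student indices
theorem pv_flatten_replicate (R : Nat) :
    (List.replicate R ([0, 2, 5, 7, 10, 12] : List Int)).flatten
      = (List.range (6 * R)).map (fun k => ([0, 2, 5, 7, 10, 12] : List Int).getD (k % 6) 0) := by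
  induction R with
  | zero => simp
  | succ R ih =>
      rw [List.replicate_succ, List.flatten_cons, ih,
        show 6 * (R + 1) = 6 + 6 * R from by ring, List.range_add, List.map_append,
        List.map_map]
      have h2 : List.map ((fun k => ([0, 2, 5, 7, 10, 12] : List Int).getD (k % 6) 0) ∘ (fun x => 6 + x)) (List.range (6 * R))
          = List.map (fun k => ([0, 2, 5, 7, 10, 12] : List Int).getD (k % 6) 0) (List.range (6 * R)) := by
        apply List.map_congr_left
        intro k _
        simp [Nat.add_mod_left]
      rw [h2]
      congr 1

-- the row loop of A, characterised pointwise over student indices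
theorem pv_ys_fold (R : Nat) :
    (PySem.List.pyRange 0 (R : Int) 1).foldl (fun ys row => ys ++ List.replicate 6 (row * 4)) []
      = (List.range (6 * R)).map (fun k => ((k / 6 : Nat) : Int) * 4) := by
  induction R with
  | zero => simp [PySem.List.pyRange_one_eq_nil]
  | succ R ih =>
      rw [show ((R + 1 : Nat) : Int) = (R : Int) + 1 from by push_cast; ring,
        PySem.List.pyRange_one_succ_right (by positivity), List.foldl_append, ih,
        show 6 * (R + 1) = 6 * R + 6 from by ring, List.range_add, List.map_append]
      simp only [List.foldl_cons, List.foldl_nil]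
      congr 1
      have h6 : (List.range 6).map (fun j => ((((6 * R + j) / 6 : Nat)) : Int) * 4)
          = List.replicate 6 ((R : Int) * 4) := by
        simp [List.range_succ]
        omega
      rw [List.map_map]
      simpa using h6.symm

theorem latexDeskPositionsSixByFourStandard_spec' (n : Int) :
    latexDeskPositionsSixByFourStandard n = latexDeskPositionsSixByFourStandard_alt n := by
  simp only [latexDeskPositionsSixByFourStandard, latexDeskPositionsSixByFourStandard_alt]
  have hfd : PySem.Int.floordiv (n - 1) 6 = (n - 1) / 6 :=
    PySem.Int.floordiv_eq_ediv_of_pos (by norm_num)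
  by_cases hn : n ≤ 0
  · -- num_rows ≤ 0: everything is empty on both sides
    have hr : PySem.Int.floordiv (n - 1) 6 + 1 ≤ 0 := by rw [hfd]; omega
    rw [PySem.List.pyRange_one_eq_nil hr, PySem.List.pyRange_one_eq_nil hn,
      show (PySem.Int.floordiv (n - 1) 6 + 1).toNat = 0 from by omega]
    simp [PySem.List.slice, PySem.List.clampIdx]
  · -- n > 0
    push Not at hn
    set r : Int := PySem.Int.floordiv (n - 1) 6 + 1 with hrdef
    have hrpos : 0 < r := by rw [hrdef, hfd]; omega
    have hR : (6 : Int) * r = ((6 * r.toNat : Nat) : Int) := by push_cast; omega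
    have hle : n.toNat ≤ 6 * r.toNat := by
      have : n ≤ 6 * r := by rw [hrdef, hfd]; omega
      omega
    have hRcast : r = ((r.toNat : Nat) : Int) := by omega
    have h0 : (0 : Int) ≤ n := hn.le
    rw [pv_flatten_replicate, hRcast, pv_ys_fold]
    simp only [Int.toNat_natCast]
    rw [PySem.List.slice_to _ h0, PySem.List.slice_to _ h0,
      ← List.map_take, ← List.map_take, List.take_range,
      Nat.min_eq_left hle,
      PySem.List.pyRange_one 0 n]
    simp only [zero_add, sub_zero, List.map_map]
    refine Prod.ext ?_ ?_ <;>
    · apply List.map_congr_left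
      intro k _
      show _ = _
      rw [show ((6 : Int)) = ((6 : Nat) : Int) from by norm_num]
      simp only [Function.comp_apply, PySem.Int.mod_natCast, PySem.Int.floordiv_natCast,
        PySem.List.pyGetD_natCast]

-- ===== VERDICT (by name: the statement is the Claim_ definition above) =====
theorem latexDeskPositionsSixByFourStandard_spec : Claim_equal_latexDeskPositionsSixByFourStandard := by
  intro n _
  exact latexDeskPositionsSixByFourStandard_spec' n
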